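-- pv_equiv track=rewrite | github.com/TimmyZ19/Pyton_GB | Sem3_HW/1_5.py | num_febonachi
-- ===== SOURCE A (Python) =====
-- def num_febonachi(num):
--     arr = [0]
--     j = 1
--     for i in range(1, num + 1):
--         if i % 2 == 0:
--             arr.insert(0, -j)
--         else:
--             arr.insert(0, j)
--         arr.append(j)
--         j += arr[-2]
--     return arr
-- ===== SOURCE B (Python) =====
-- def num_febonachi(num):
--     # B: build the Fibonacci magnitude table once, then assemble
--     # left (signed, descending) ++ [0] ++ right in separate passes.
--     f = []
--     a, b = 0, 1
--     for _ in range(num):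
--         f.append(b)
--         a, b = b, a + b
--     left = [f[i - 1] if i % 2 == 1 else -f[i - 1] for i in range(num, 0, -1)]
--     return left + [0] + f
-- ===== Notes on version B (the rewrite author's own statement) =====
-- stated objective: faster
-- what changed: Replaces A's middle-out loop with front-inserts (each insert(0, x) shifts the whole list) by an iterative Fibonacci table build followed by a signed reversed comprehension and one concatenation.
import Mathlib
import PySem

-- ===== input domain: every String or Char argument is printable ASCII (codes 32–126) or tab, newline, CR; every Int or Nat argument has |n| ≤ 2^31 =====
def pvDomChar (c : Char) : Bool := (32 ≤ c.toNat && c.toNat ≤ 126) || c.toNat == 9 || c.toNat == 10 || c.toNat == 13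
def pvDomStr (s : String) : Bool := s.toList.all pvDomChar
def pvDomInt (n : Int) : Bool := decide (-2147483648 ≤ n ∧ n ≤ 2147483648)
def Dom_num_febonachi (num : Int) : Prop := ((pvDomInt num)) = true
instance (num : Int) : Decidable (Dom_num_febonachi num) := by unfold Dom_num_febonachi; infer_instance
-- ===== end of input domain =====

-- B builds the Fibonacci table once and assembles left ++ [0] ++ right in separate
-- passes instead of A's middle-out loop with quadratic front-inserts.

-- ===== PORT A =====
-- arr[-2] is always in range when A reads it (arr has ≥ 3 elements then), so pyGetD's default is never used
def num_febonachi (num : Int) : List Int :=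
  ((PySem.List.pyRange 1 (num + 1) 1).foldl
    (fun (st : List Int × Int) i =>
      let arr := st.1
      let j := st.2
      let arr := if PySem.Int.mod i 2 = 0 then PySem.List.insert arr 0 (-j)
                 else PySem.List.insert arr 0 j
      let arr := arr ++ [j]
      (arr, j + PySem.List.pyGetD arr (-2) 0)) ([0], 1)).1

-- ===== PORT B =====
-- f[i-1] is always in range (1 ≤ i ≤ num = len f), so pyGetD's default is never used
def num_febonachi_alt (num : Int) : List Int :=
  let f := ((PySem.List.pyRange 0 num 1).foldl
    (fun (p : List Int × Int × Int) _ => (p.1 ++ [p.2.2], p.2.2, p.2.1 + p.2.2))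
    ([], 0, 1)).1
  let left := (PySem.List.pyRange num 0 (-1)).map
    (fun i => if PySem.Int.mod i 2 = 1 then PySem.List.pyGetD f (i - 1) 0
              else -(PySem.List.pyGetD f (i - 1) 0))
  left ++ [0] ++ f

-- ===== PRECONDITION & SPEC =====
def Spec_num_febonachi (num : Int) (out : List Int) : Prop := out = num_febonachi_alt num
instance (num : Int) (out : List Int) : Decidable (Spec_num_febonachi num out) := by unfold Spec_num_febonachi; infer_instance

-- ===== CLAIM (what is proved, stated in full; the proofs are below) =====
def Claim_equal_num_febonachi : Prop := ∀ (num : Int), Dom_num_febonachi num → Spec_num_febonachi num (num_febonachi num)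

-- ===== LEMMAS AND PROOFS =====

-- Fibonacci magnitudes: fib 1 = fib 2 = 1, fib (n+2) = fib n + fib (n+1)
def fib : Nat → Int
  | 0 => 0
  | 1 => 1
  | n + 2 => fib n + fib (n + 1)

-- the right half [fib 1, …, fib n]
def fibRow (n : Nat) : List Int := (List.range n).map (fun k => fib (k + 1))

-- the left half, head = step n: sign + for odd step, - for even step
def leftL : Nat → List Int
  | 0 => []
  | n + 1 => (if (n + 1) % 2 = 0 then -fib (n + 1) else fib (n + 1)) :: leftL n

lemma fibRow_succ (n : Nat) : fibRow (n + 1) = fibRow n ++ [fib (n + 1)] := by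
  simp [fibRow, List.range_succ]

lemma pyGetD_neg_two (l : List Int) (a d : Int) (hl : l ≠ []) :
    PySem.List.pyGetD (l ++ [a]) (-2) d = l.getLastD d := by
  have h0 : 0 < l.length := List.length_pos_iff.mpr hl
  rw [PySem.List.pyGetD_neg_ofNat (l ++ [a]) 2 d (by omega) (by simp; omega)]
  have : l.length + 1 - 2 = l.length - 1 := by omega
  simp only [List.length_append, List.length_cons, List.length_nil, this]
  rw [List.getElem_append_left (by omega)]
  rw [List.getLastD_eq_getLast?, List.getLast?_eq_getElem?]
  simp [List.getElem?_eq_getElem (by omega : l.length - 1 < l.length)]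

lemma getLastD_mid (x d : Int) (n : Nat) (L : List Int) :
    (x :: (L ++ 0 :: fibRow n)).getLastD d = fib n := by
  cases n with
  | zero =>
      have : x :: (L ++ 0 :: fibRow 0) = (x :: L) ++ [0] := by simp [fibRow]
      rw [this, List.getLastD_concat]; rfl
  | succ m =>
      rw [fibRow_succ]
      have : x :: (L ++ 0 :: (fibRow m ++ [fib (m + 1)]))
           = (x :: (L ++ 0 :: fibRow m)) ++ [fib (m + 1)] := by simp
      rw [this, List.getLastD_concat]

-- characterisation of A's loop
lemma A_char (n : Nat) :
    (PySem.List.pyRange 1 ((n : Int) + 1) 1).foldl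
      (fun (st : List Int × Int) i =>
        let arr := st.1
        let j := st.2
        let arr := if PySem.Int.mod i 2 = 0 then PySem.List.insert arr 0 (-j)
                   else PySem.List.insert arr 0 j
        let arr := arr ++ [j]
        (arr, j + PySem.List.pyGetD arr (-2) 0)) ([0], 1)
      = (leftL n ++ 0 :: fibRow n, fib (n + 1)) := by
  induction n with
  | zero => simp [PySem.List.pyRange_one_eq_nil, leftL, fibRow, fib]
  | succ m ih =>
      have hc : ((m + 1 : Nat) : Int) + 1 = ((m : Int) + 1) + 1 := by push_cast; ring
      rw [hc, PySem.List.pyRange_one_succ_right (by omega), List.foldl_append]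
      have hc2 : ((m : Int) + 1) = ((m + 1 : Nat) : Int) := by push_cast; ring
      rw [ih]
      simp only [List.foldl_cons, List.foldl_nil, hc2, PySem.List.insert_zero]
      have hmod : PySem.Int.mod ((m + 1 : Nat) : Int) 2 = (((m + 1) % 2 : Nat) : Int) := by
        exact_mod_cast PySem.Int.mod_natCast (m + 1) 2
      rw [hmod]
      have hget : ∀ x : Int,
          PySem.List.pyGetD ((x :: (leftL m ++ 0 :: fibRow m)) ++ [fib (m + 1)]) (-2) 0
            = fib m := by
        intro x
        rw [pyGetD_neg_two _ _ _ (by simp), getLastD_mid]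
      have hfib : fib (m + 1) + fib m = fib (m + 1 + 1) := by
        show _ = fib (m + 2); rw [fib]; ring
      by_cases hm : (m + 1) % 2 = 0
      · rw [if_pos (by exact_mod_cast hm), Prod.mk.injEq]
        refine ⟨?_, by rw [hget]; exact hfib⟩
        rw [fibRow_succ, leftL, if_pos hm]; simp
      · rw [if_neg (by exact_mod_cast hm), Prod.mk.injEq]
        refine ⟨?_, by rw [hget]; exact hfib⟩
        rw [fibRow_succ, leftL, if_neg hm]; simp

-- characterisation of B's table loop
lemma B_tab (n : Nat) :
    (PySem.List.pyRange 0 (n : Int) 1).foldl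
      (fun (p : List Int × Int × Int) _ => (p.1 ++ [p.2.2], p.2.2, p.2.1 + p.2.2))
      ([], 0, 1) = (fibRow n, fib n, fib (n + 1)) := by
  induction n with
  | zero => simp [PySem.List.pyRange_one_eq_nil, fibRow, fib]
  | succ m ih =>
      have hc : ((m + 1 : Nat) : Int) = (m : Int) + 1 := by push_cast; ring
      rw [hc, PySem.List.pyRange_one_succ_right (by omega), List.foldl_append, ih]
      simp only [List.foldl_cons, List.foldl_nil]
      refine Prod.ext (by rw [fibRow_succ]) (Prod.ext rfl ?_)
      show fib m + fib (m + 1) = fib (m + 1 + 1)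
      rw [show m + 1 + 1 = m + 2 from rfl, fib]

-- characterisation of B's left comprehension (generalized table size m ≥ n)
lemma B_left (m n : Nat) (h : n ≤ m) :
    (PySem.List.pyRange (n : Int) 0 (-1)).map
      (fun i => if PySem.Int.mod i 2 = 1 then PySem.List.pyGetD (fibRow m) (i - 1) 0
                else -(PySem.List.pyGetD (fibRow m) (i - 1) 0)) = leftL n := by
  induction n with
  | zero => rw [PySem.List.pyRange_neg_one_eq_nil (by omega)]; rfl
  | succ k ih =>
      rw [PySem.List.pyRange_neg_one_cons (by exact_mod_cast Nat.succ_pos k), List.map_cons]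
      have ht : ((k + 1 : Nat) : Int) - 1 = (k : Int) := by push_cast; ring
      rw [ht, ih (by omega)]
      have hget : PySem.List.pyGetD (fibRow m) ((k : Nat) : Int) 0 = fib (k + 1) := by
        rw [PySem.List.pyGetD_natCast]
        have hk : k < (List.range m).length := by simpa using (by omega : k < m)
        simp [fibRow, List.getD, List.getElem?_map, List.getElem?_range (by omega : k < m)]
      have hmod : PySem.Int.mod ((k + 1 : Nat) : Int) 2 = (((k + 1) % 2 : Nat) : Int) := by
        exact_mod_cast PySem.Int.mod_natCast (k + 1) 2
      rw [hmod, hget]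
      show (if _ then _ else _) :: leftL k = leftL (k + 1)
      rw [leftL]
      by_cases hk : (k + 1) % 2 = 0
      · rw [if_neg (by simp [hk]), if_pos hk]
      · have h1 : (k + 1) % 2 = 1 := by omega
        rw [if_pos (by exact_mod_cast h1), if_neg hk]

-- ===== VERDICT (by name: the statement is the Claim_ definition above) =====
theorem num_febonachi_spec : Claim_equal_num_febonachi := by
  intro num _
  unfold Spec_num_febonachi num_febonachi num_febonachi_alt
  by_cases h : num ≤ 0
  · rw [PySem.List.pyRange_one_eq_nil (by omega), PySem.List.pyRange_one_eq_nil (by omega),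
      PySem.List.pyRange_neg_one_eq_nil (by omega)]
    simp
  · obtain ⟨n, rfl⟩ : ∃ n : Nat, num = (n : Int) := ⟨num.toNat, by omega⟩
    rw [A_char n, B_tab n]
    simp only
    rw [B_left n n le_rfl]
    simp
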